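-- pv_equiv track=rewrite | github.com/Maxaxaf/git-project-lessons | fff.py | check_rel_properties_inter
-- ===== SOURCE A (Python) =====
-- def check_rel_properties_inter(mat):
--     """Проверка свойств отношения между разными множествами"""
--     m = len(mat)
--     n = len(mat[0]) if mat else 0
--
--     totality = all(any(row) for row in mat)
--     functionality = all(sum(row) <= 1 for row in mat)
--     surjectivity = all(any(mat[i][j] for i in range(m)) for j in range(n))
--     injectivity = all(sum(mat[i][j] for i in range(m)) <= 1 for j in range(n))
--     bijectivity = totality and functionality and surjectivity and injectivity
--
--     return {
--         "totality": totality,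
--         "functionality": functionality,
--         "surjectivity": surjectivity,
--         "injectivity": injectivity,
--         "bijectivity": bijectivity
--     }
-- ===== SOURCE B (Python) =====
-- def check_rel_properties_inter(mat):
--     """One pass over the rows with column accumulators instead of A's
--     four independent scans (row scans plus per-column index scans)."""
--     n = len(mat[0]) if mat else 0
--     totality = True
--     functionality = True
--     col_any = [False] * n
--     col_sum = [0] * n
--     for row in mat:
--         if not any(row):
--             totality = False
--         if sum(row) > 1:
--             functionality = False
--         for j in range(n):
--             v = row[j]
--             if v:
--                 col_any[j] = True
--             col_sum[j] += v
--     surjectivity = all(col_any)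
--     injectivity = all(s <= 1 for s in col_sum)
--     bijectivity = totality and functionality and surjectivity and injectivity
--     return {
--         "totality": totality,
--         "functionality": functionality,
--         "surjectivity": surjectivity,
--         "injectivity": injectivity,
--         "bijectivity": bijectivity,
--     }
-- ===== Notes on version B (the rewrite author's own statement) =====
-- stated objective: alternative
-- what changed: Replaces A's four independent scans (two over rows plus per-column generators that re-index the whole matrix for every column) by a single pass over the rows maintaining column accumulators col_any/col_sum; same asymptotic cost.
import Mathlib
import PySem

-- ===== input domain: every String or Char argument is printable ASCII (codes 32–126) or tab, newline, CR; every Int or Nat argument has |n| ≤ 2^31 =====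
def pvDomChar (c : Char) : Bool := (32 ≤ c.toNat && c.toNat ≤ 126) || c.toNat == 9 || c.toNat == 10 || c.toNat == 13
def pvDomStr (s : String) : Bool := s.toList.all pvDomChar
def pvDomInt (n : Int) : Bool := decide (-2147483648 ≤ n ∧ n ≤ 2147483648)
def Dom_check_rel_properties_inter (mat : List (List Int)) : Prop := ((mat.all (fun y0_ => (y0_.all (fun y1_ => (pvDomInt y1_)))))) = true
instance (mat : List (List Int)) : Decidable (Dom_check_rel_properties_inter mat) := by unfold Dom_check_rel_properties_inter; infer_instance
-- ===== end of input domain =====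

-- B makes one pass over the rows with column accumulators instead of A's four independent scans. Equivalence is about the RETURN value (neither version mutates its argument).

-- ===== PORT A =====
-- mat[i][j]; under Pre_ (every row has length ≥ n) every index A evaluates is in range, so getD is exact
def pvCellA (mat : List (List Int)) (i j : Nat) : Int := (mat.getD i []).getD j 0

def check_rel_properties_inter (mat : List (List Int)) : List (String × Bool) :=
  let m := mat.length
  let n := match mat with | [] => 0 | r :: _ => r.length   -- len(mat[0]) if mat else 0
  let totality := mat.all (fun row => row.any (fun v => decide (v ≠ 0)))
  let functionality := mat.all (fun row => decide (row.sum ≤ 1))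
  let surjectivity := (List.range n).all (fun j => (List.range m).any (fun i => decide (pvCellA mat i j ≠ 0)))
  let injectivity := (List.range n).all (fun j => decide (((List.range m).map (fun i => pvCellA mat i j)).sum ≤ 1))
  let bijectivity := totality && functionality && surjectivity && injectivity
  [("totality", totality), ("functionality", functionality), ("surjectivity", surjectivity),
   ("injectivity", injectivity), ("bijectivity", bijectivity)]

-- ===== PORT B =====
-- one row of Source B's loop body: update totality, functionality, col_any, col_sum
-- (row[j]: under Pre_ j < n ≤ row.length, so getD is exact)
def pvStepB (n : Nat) (st : Bool × Bool × List Bool × List Int) (row : List Int) :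
    Bool × Bool × List Bool × List Int :=
  (st.1 && row.any (fun v => decide (v ≠ 0)),
   st.2.1 && decide (row.sum ≤ 1),
   (List.range n).map (fun j => st.2.2.1.getD j false || decide (row.getD j 0 ≠ 0)),
   (List.range n).map (fun j => st.2.2.2.getD j 0 + row.getD j 0))

def check_rel_properties_inter_alt (mat : List (List Int)) : List (String × Bool) :=
  let n := match mat with | [] => 0 | r :: _ => r.length
  let st := mat.foldl (pvStepB n) (true, true, List.replicate n false, List.replicate n 0)
  let surjectivity := st.2.2.1.all id
  let injectivity := st.2.2.2.all (fun s => decide (s ≤ 1))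
  let bijectivity := st.1 && st.2.1 && surjectivity && injectivity
  [("totality", st.1), ("functionality", st.2.1), ("surjectivity", surjectivity),
   ("injectivity", injectivity), ("bijectivity", bijectivity)]

-- ===== PRECONDITION & SPEC =====
-- Pre_ excludes ragged matrices with a row shorter than len(mat[0]): there A raises IndexError
-- except when its short-circuiting any/all happens to skip the missing cells (an accident of
-- evaluation order), and B's single pass raises IndexError on all of them.
def Pre_check_rel_properties_inter (mat : List (List Int)) : Prop :=
  ∀ row ∈ mat, (mat.headD []).length ≤ row.length
instance (mat : List (List Int)) : Decidable (Pre_check_rel_properties_inter mat) := by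
  unfold Pre_check_rel_properties_inter; infer_instance

def pvWitness_check_rel_properties_inter : List (List Int) := [[1, 0], [0, 1]]

def Spec_check_rel_properties_inter (mat : List (List Int)) (out : List (String × Bool)) : Prop := out = check_rel_properties_inter_alt mat
instance (mat : List (List Int)) (out : List (String × Bool)) : Decidable (Spec_check_rel_properties_inter mat out) := by unfold Spec_check_rel_properties_inter; infer_instance

-- ===== CLAIM (what is proved, stated in full; the proofs are below) =====
def Claim_equal_check_rel_properties_inter : Prop := ∀ (mat : List (List Int)), Dom_check_rel_properties_inter mat → Pre_check_rel_properties_inter mat → Spec_check_rel_properties_inter mat (check_rel_properties_inter mat)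

-- ===== LEMMAS AND PROOFS =====

-- reading a map over range back off by getD recovers the list
theorem pv_map_range_getD {α : Type} [Inhabited α] (xs : List α) (d : α) :
    (List.range xs.length).map (fun j => xs.getD j d) = xs := by
  apply List.ext_getElem
  · simp
  · intro i h1 h2
    simp [List.getD_eq_getElem?_getD, List.getElem?_eq_getElem h2]

-- indexing by range(len) is the same as traversing the list (any form)
theorem pv_any_range_getD (mat : List (List Int)) (f : List Int → Bool) :
    (List.range mat.length).any (fun i => f (mat.getD i [])) = mat.any f := by
  induction mat with
  | nil => simp
  | cons r rest ih =>
      rw [show (r :: rest).length = rest.length + 1 from rfl, List.range_succ_eq_map]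
      simp only [List.any_cons, List.any_map]
      simp only [Function.comp_def, List.getD_cons_succ, List.getD_cons_zero]
      rw [ih]

-- indexing by range(len) is the same as traversing the list (map form)
theorem pv_map_range_getD_rows (mat : List (List Int)) (g : List Int → Int) :
    (List.range mat.length).map (fun i => g (mat.getD i [])) = mat.map g := by
  induction mat with
  | nil => simp
  | cons r rest ih =>
      rw [show (r :: rest).length = rest.length + 1 from rfl, List.range_succ_eq_map]
      simp only [List.map_cons, List.map_map]
      simp only [Function.comp_def, List.getD_cons_succ, List.getD_cons_zero]
      rw [ih]

-- closed form of B's fold: the whole accumulator state after consuming `mat`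
theorem pv_foldB_closed (n : Nat) (mat : List (List Int)) (t f : Bool)
    (ca : List Bool) (cs : List Int) (hca : ca.length = n) (hcs : cs.length = n) :
    mat.foldl (pvStepB n) (t, f, ca, cs) =
      (t && mat.all (fun row => row.any (fun v => decide (v ≠ 0))),
       f && mat.all (fun row => decide (row.sum ≤ 1)),
       (List.range n).map (fun j => ca.getD j false || mat.any (fun row => decide (row.getD j 0 ≠ 0))),
       (List.range n).map (fun j => cs.getD j 0 + (mat.map (fun row => row.getD j 0)).sum)) := by
  induction mat generalizing t f ca cs with
  | nil =>
      simp only [List.foldl_nil, List.all_nil, List.any_nil, List.map_nil, Bool.and_true,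
        Bool.or_false, List.sum_nil, add_zero]
      subst hca
      rw [pv_map_range_getD ca false, ← hcs, pv_map_range_getD cs 0]
  | cons row rest ih =>
      rw [List.foldl_cons]
      show List.foldl (pvStepB n) (pvStepB n (t, f, ca, cs) row) rest = _
      rw [pvStepB, ih _ _ _ _ (by simp) (by simp)]
      simp only [Prod.mk.injEq]
      refine ⟨by simp [Bool.and_assoc], by simp [Bool.and_assoc], ?_, ?_⟩
      · apply List.map_congr_left
        intro j hj
        have hjn : j < n := List.mem_range.mp hj
        rw [List.getD_eq_getElem?_getD, List.getElem?_map,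
            List.getElem?_range hjn]
        simp [Bool.or_assoc]
      · apply List.map_congr_left
        intro j hj
        have hjn : j < n := List.mem_range.mp hj
        rw [List.getD_eq_getElem?_getD, List.getElem?_map,
            List.getElem?_range hjn]
        simp [add_assoc]

-- ===== VERDICT (by name: the statement is the Claim_ definition above) =====
theorem check_rel_properties_inter_spec : Claim_equal_check_rel_properties_inter := by
  intro mat _ _
  unfold Spec_check_rel_properties_inter check_rel_properties_inter check_rel_properties_inter_alt
  dsimp only
  rw [pv_foldB_closed _ _ _ _ _ _ (by simp) (by simp)]
  have hrepb : ∀ (k j : Nat), (List.replicate k false).getD j false = false := by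
    intro k j
    simp only [List.getD_eq_getElem?_getD, List.getElem?_replicate]
    split <;> rfl
  have hrep0 : ∀ (k j : Nat), (List.replicate k (0 : Int)).getD j 0 = 0 := by
    intro k j
    simp only [List.getD_eq_getElem?_getD, List.getElem?_replicate]
    split <;> rfl
  have hsurj : ∀ j : Nat,
      ((List.range mat.length).any (fun i => decide (pvCellA mat i j ≠ 0))) =
        mat.any (fun row => decide (row.getD j 0 ≠ 0)) := by
    intro j; exact pv_any_range_getD mat (fun row => decide (row.getD j 0 ≠ 0))
  have hinj : ∀ j : Nat,
      ((List.range mat.length).map (fun i => pvCellA mat i j)) =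
        mat.map (fun row => row.getD j 0) := by
    intro j; exact pv_map_range_getD_rows mat (fun row => row.getD j 0)
  simp only [hrepb, hrep0, Bool.false_or, zero_add, Bool.true_and,
    List.all_map, Function.comp_def, id_eq, hsurj, hinj]
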